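-- pv_equiv track=rewrite | github.com/markusfocke/AOC2024 | day19.2.py | material_in_wf
-- ===== SOURCE A (Python) =====
-- def material_in_wf(workflow, materialtyp, matval):
--     """
--     Ermittelt den nächsten Workflow aus einem Workflow, dem Material und dem Materialwert.
--     Berücksichtigt alle Bedingungen für einen Materialtyp, bevor zu einem anderen übergegangen wird.
--     Durch ChatGPT umgebaut
--     """
--     enthalten = False
--     newf = ""
--
--     # Durchsuche alle Bedingungen für den gegebenen Materialtyp
--     for tuple in workflow:
--         if tuple[0] == materialtyp:
--             if tuple[1] == "<" and matval < tuple[2]: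
--                 newf = tuple[3]
--                 enthalten = True
--                 break
--             elif tuple[1] == ">" and matval > tuple[2]:
--                 newf = tuple[3]
--                 enthalten = True
--                 break
--
--     # Wenn keine Bedingung für den gegebenen Materialtyp erfüllt ist, verwende den Standardworkflow
--     if not enthalten:
--         for tuple in workflow:
--             if tuple[0] == "xxxx":
--                 newf = tuple[3]
--                 break
--
--     return newf, enthalten
-- ===== SOURCE B (Python) =====
-- def material_in_wf(workflow, materialtyp, matval):
--     """Single pass: find first matching rule while recording the first 'xxxx' default."""
--     default = None
--     for typ, op, val, target in workflow:
--         if typ == materialtyp and ((op == "<" and matval < val) or (op == ">" and matval > val)):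
--             return target, True
--         if typ == "xxxx" and default is None:
--             default = target
--     return (default if default is not None else ""), False
-- ===== Notes on version B (the rewrite author's own statement) =====
-- stated objective: simpler
-- what changed: Replaces A's two sequential scans (match scan, then default 'xxxx' scan) by one loop that returns on the first matching rule while recording the first 'xxxx' default as it goes.
import Mathlib
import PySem

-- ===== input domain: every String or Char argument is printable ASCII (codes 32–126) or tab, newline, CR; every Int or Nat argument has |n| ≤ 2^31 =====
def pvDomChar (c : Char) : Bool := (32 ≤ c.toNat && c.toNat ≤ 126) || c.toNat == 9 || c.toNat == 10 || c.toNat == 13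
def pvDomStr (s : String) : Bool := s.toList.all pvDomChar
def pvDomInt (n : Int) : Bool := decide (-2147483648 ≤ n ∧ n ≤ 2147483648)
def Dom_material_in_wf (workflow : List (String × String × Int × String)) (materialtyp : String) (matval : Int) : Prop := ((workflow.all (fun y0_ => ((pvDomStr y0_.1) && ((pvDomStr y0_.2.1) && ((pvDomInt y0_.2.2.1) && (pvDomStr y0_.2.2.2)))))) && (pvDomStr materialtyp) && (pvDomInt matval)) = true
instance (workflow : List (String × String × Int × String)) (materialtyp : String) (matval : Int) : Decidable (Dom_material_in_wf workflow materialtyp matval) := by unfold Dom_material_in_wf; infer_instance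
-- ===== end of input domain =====

-- B replaces A's two sequential scans with a single loop that records the first "xxxx" default while searching for the first matching rule (objective: simpler).


-- ===== PORT A =====
-- first loop of A: scan for the first matching rule for materialtyp (break → some target)
def pvALoop1 (workflow : List (String × String × Int × String)) (materialtyp : String) (matval : Int) : Option String :=
  match workflow with
  | [] => none
  | t :: rest =>
    if t.1 == materialtyp then
      if t.2.1 == "<" && decide (matval < t.2.2.1) then some t.2.2.2
      else if t.2.1 == ">" && decide (matval > t.2.2.1) then some t.2.2.2
      else pvALoop1 rest materialtyp matval
    else pvALoop1 rest materialtyp matval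

-- second loop of A: first "xxxx" rule's target, else the initial newf = ""
def pvALoop2 (workflow : List (String × String × Int × String)) : String :=
  match workflow with
  | [] => ""
  | t :: rest => if t.1 == "xxxx" then t.2.2.2 else pvALoop2 rest

def material_in_wf (workflow : List (String × String × Int × String)) (materialtyp : String) (matval : Int) : String × Bool :=
  match pvALoop1 workflow materialtyp matval with
  | some f => (f, true)
  | none => (pvALoop2 workflow, false)

-- ===== PORT B =====
-- single pass with a `default : Option String` accumulator (Source B's loop)
def pvBLoop (workflow : List (String × String × Int × String)) (materialtyp : String) (matval : Int) (dflt : Option String) : String × Bool :=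
  match workflow with
  | [] => (dflt.getD "", false)
  | (typ, op, val, target) :: rest =>
    if typ == materialtyp && ((op == "<" && decide (matval < val)) || (op == ">" && decide (matval > val))) then
      (target, true)
    else
      pvBLoop rest materialtyp matval (if typ == "xxxx" && dflt.isNone then some target else dflt)

def material_in_wf_alt (workflow : List (String × String × Int × String)) (materialtyp : String) (matval : Int) : String × Bool :=
  pvBLoop workflow materialtyp matval none

-- ===== PRECONDITION & SPEC =====
def Spec_material_in_wf (workflow : List (String × String × Int × String)) (materialtyp : String) (matval : Int) (out : String × Bool) : Prop := out = material_in_wf_alt workflow materialtyp matval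
instance (workflow : List (String × String × Int × String)) (materialtyp : String) (matval : Int) (out : String × Bool) : Decidable (Spec_material_in_wf workflow materialtyp matval out) := by unfold Spec_material_in_wf; infer_instance

-- ===== CLAIM (what is proved, stated in full; the proofs are below) =====
def Claim_equal_material_in_wf : Prop := ∀ (workflow : List (String × String × Int × String)) (materialtyp : String) (matval : Int), Dom_material_in_wf workflow materialtyp matval → Spec_material_in_wf workflow materialtyp matval (material_in_wf workflow materialtyp matval)

-- ===== LEMMAS AND PROOFS =====

-- the single pass equals: first match if any, else the carried default, else the first "xxxx" target
theorem pvBLoop_eq (workflow : List (String × String × Int × String)) (materialtyp : String) (matval : Int) (dflt : Option String) :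
    pvBLoop workflow materialtyp matval dflt =
      match pvALoop1 workflow materialtyp matval with
      | some f => (f, true)
      | none =>
        match dflt with
        | some x => (x, false)
        | none => (pvALoop2 workflow, false) := by
  induction workflow generalizing dflt with
  | nil => cases dflt <;> simp [pvBLoop, pvALoop1, pvALoop2]
  | cons t rest ih =>
    obtain ⟨typ, op, val, target⟩ := t
    simp only [pvBLoop, pvALoop1, pvALoop2]
    by_cases h1 : typ = materialtyp
    · subst h1
      by_cases hlt : (op == "<" && decide (matval < val)) = true
      · simp [hlt]
      · by_cases hgt : (op == ">" && decide (matval > val)) = true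
        · simp [hlt, hgt]
        · simp only [hlt, hgt, beq_self_eq_true, Bool.true_and, Bool.or_self, if_true]
          rw [ih]
          cases dflt with
          | some x => simp
          | none => by_cases h5 : typ = "xxxx" <;> simp [h5]
    · have h1' : (typ == materialtyp) = false := by simp [h1]
      simp only [h1', Bool.false_and]
      rw [ih]
      cases dflt with
      | some x => simp
      | none => by_cases h5 : typ = "xxxx" <;> simp [h5]

-- ===== VERDICT (by name: the statement is the Claim_ definition above) =====
theorem material_in_wf_spec : Claim_equal_material_in_wf := by
  intro wf mt mv _
  unfold Spec_material_in_wf material_in_wf material_in_wf_alt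
  rw [pvBLoop_eq]
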